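-- pv_equiv track=rewrite | github.com/jaeml06/Codeing-Test | 프로그래머스/1/133499. 옹알이 （2）/옹알이 （2）.py | solution
-- ===== SOURCE A (Python) =====
-- def solution(babbling):
--     words = ["aya", "ye", "woo", "ma"]
--     answer = 0
--
--     for b in babbling:
--         i = 0
--         prev = ""
--         ok = True
--
--         while i < len(b):
--             matched = False
--
--             for w in words:
--                 if b.startswith(w, i) and w != prev:
--                     prev = w
--                     i += len(w)
--                     matched = True
--                     break
--
--             if not matched:
--                 ok = False
--                 break
--
--         if ok:
--             answer += 1
--
--     return answer
-- ===== SOURCE B (Python) =====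
-- _TOK = {"a": "aya", "y": "ye", "w": "woo", "m": "ma"}
--
--
-- def _ok(b):
--     prev = ""
--     while b:
--         w = _TOK.get(b[0])
--         if w is None or w == prev or not b.startswith(w):
--             return False
--         b = b[len(w):]
--         prev = w
--     return True
--
--
-- def solution(babbling):
--     return sum(_ok(b) for b in babbling)
-- ===== Notes on version B (the rewrite author's own statement) =====
-- stated objective: faster
-- what changed: Replaces A's inner first-match scan over the word list (startswith tried for each of the four words at every position) by a single dict dispatch on the first character (the four words have pairwise distinct first letters), consuming the string suffix by suffix.
import Mathlib
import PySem

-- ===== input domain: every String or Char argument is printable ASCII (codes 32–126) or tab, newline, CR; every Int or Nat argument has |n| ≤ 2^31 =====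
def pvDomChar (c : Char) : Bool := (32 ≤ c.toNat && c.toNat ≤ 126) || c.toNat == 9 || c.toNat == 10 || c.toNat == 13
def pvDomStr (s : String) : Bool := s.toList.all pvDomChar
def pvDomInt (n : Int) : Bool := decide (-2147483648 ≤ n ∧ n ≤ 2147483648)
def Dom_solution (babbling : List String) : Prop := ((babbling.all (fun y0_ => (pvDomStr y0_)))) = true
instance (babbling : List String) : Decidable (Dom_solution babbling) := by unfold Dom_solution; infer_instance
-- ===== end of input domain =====

-- B replaces A's inner first-match scan over the word list by a first-character dispatch
-- table (the four words have distinct first letters), consuming the string suffix by suffix;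
-- objective: faster by a constant factor (measured), same asymptotics.

-- ===== PORT A =====
def wordsA : List String := ["aya", "ye", "woo", "ma"]

-- the inner 'for w in words: if b.startswith(w, i) and w != prev: … break' of A, on the
-- suffix s = b[i:]: b.startswith(w, i) with 0 ≤ i ≤ len(b) is exactly startswith(b[i:], w)
-- (i stays ≤ len(b) throughout A's loop)
def findMatch : List String → List Char → String → Option String
  | [], _, _ => none
  | w :: ws, s, prev =>
    if PySem.Chars.startswith s w.toList && w != prev then some w
    else findMatch ws s prev

-- needed by whileA's termination proof
theorem findMatch_mem {ws : List String} {s : List Char} {prev w : String}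
    (h : findMatch ws s prev = some w) : w ∈ ws := by
  induction ws with
  | nil => simp [findMatch] at h
  | cons x xs ih =>
    by_cases hx : PySem.Chars.startswith s x.toList && x != prev
    · simp [findMatch, hx] at h; simp [h]
    · simp only [findMatch, hx, Bool.false_eq_true, if_false] at h
      exact List.mem_cons_of_mem _ (ih h)

-- needed by whileA's termination proof
theorem wordsA_len_pos {w : String} (h : w ∈ wordsA) : 0 < w.toList.length := by
  simp [wordsA] at h
  rcases h with h | h | h | h <;> subst h <;> decide

-- A's 'while i < len(b)' loop with state (i, prev); 'ok = False; break' is the none branch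
def whileA (b : List Char) (i : Nat) (prev : String) : Bool :=
  if i < b.length then
    match hm : findMatch wordsA (b.drop i) prev with
    | some w => whileA b (i + w.toList.length) w
    | none => false
  else true
termination_by b.length - i
decreasing_by
  have := wordsA_len_pos (findMatch_mem hm)
  omega

def solution (babbling : List String) : Int :=
  babbling.foldl (fun answer b => if whileA b.toList 0 "" then answer + 1 else answer) 0

-- ===== PORT B =====
-- _TOK = {"a": "aya", "y": "ye", "w": "woo", "m": "ma"}
def TOK : PySem.Dict Char String :=
  ((((PySem.Dict.empty.insert 'a' "aya").insert 'y' "ye").insert 'w' "woo").insert 'm' "ma")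

-- closed form of the 4-entry dict lookup; needed by okB's termination proof (via TOK_len_pos)
theorem TOK_get (c : Char) : TOK.get? c =
    if c = 'a' then some "aya" else if c = 'y' then some "ye"
    else if c = 'w' then some "woo" else if c = 'm' then some "ma" else none := by
  simp [TOK, PySem.Dict.get?, PySem.Dict.insert, PySem.Dict.empty]
  split_ifs <;> simp_all
  exact ⟨fun h => absurd h.symm ‹_›, fun h => absurd h.symm ‹_›,
    fun h => absurd h.symm ‹_›, fun h => absurd h.symm ‹_›⟩

-- needed by okB's termination proof
theorem TOK_len_pos {c : Char} {w : String} (h : TOK.get? c = some w) :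
    0 < w.toList.length := by
  rw [TOK_get] at h
  split_ifs at h
  · obtain rfl : "aya" = w := by injection h
    decide
  · obtain rfl : "ye" = w := by injection h
    decide
  · obtain rfl : "woo" = w := by injection h
    decide
  · obtain rfl : "ma" = w := by injection h
    decide

-- B's 'while b' loop with state (b, prev); the 'return False' line is the false branches
def okB (b : List Char) (prev : String) : Bool :=
  match b with
  | [] => true
  | c :: rest =>
    match hw : TOK.get? c with
    | none => false
    | some w =>
      if w == prev || !(PySem.Chars.startswith (c :: rest) w.toList) then false
      else okB ((c :: rest).drop w.toList.length) w
termination_by b.length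
decreasing_by
  have := TOK_len_pos hw
  simp only [List.length_drop, List.length_cons]
  omega

def solution_alt (babbling : List String) : Int :=
  babbling.foldl (fun acc b => acc + (if okB b.toList "" then 1 else 0)) 0

-- ===== PRECONDITION & SPEC =====
def Spec_solution (babbling : List String) (out : Int) : Prop := out = solution_alt babbling
instance (babbling : List String) (out : Int) : Decidable (Spec_solution babbling out) := by unfold Spec_solution; infer_instance

-- ===== CLAIM (what is proved, stated in full; the proofs are below) =====
def Claim_equal_solution : Prop := ∀ (babbling : List String), Dom_solution babbling → Spec_solution babbling (solution babbling)

-- ===== LEMMAS AND PROOFS =====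

-- A's first-match scan over the four words agrees with B's first-character dispatch:
-- the words have pairwise distinct first letters, so on a nonempty suffix at most one
-- of them is a prefix, and it is the one TOK assigns to the first character.
theorem step_eq (c : Char) (rest : List Char) (prev : String) :
    findMatch wordsA (c :: rest) prev =
      match TOK.get? c with
      | none => none
      | some w =>
        if w = prev ∨ ¬ (w.toList <+: (c :: rest)) then none
        else some w := by
  rw [TOK_get]
  by_cases ha : c = 'a'
  · subst ha
    simp [wordsA, findMatch, PySem.Chars.startswith, List.isPrefixOf_iff_prefix]
    split_ifs <;> simp_all
  · by_cases hy : c = 'y'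
    · subst hy
      simp [wordsA, findMatch, PySem.Chars.startswith, List.isPrefixOf_iff_prefix]
      split_ifs <;> simp_all
    · by_cases hw : c = 'w'
      · subst hw
        simp [wordsA, findMatch, PySem.Chars.startswith, List.isPrefixOf_iff_prefix]
        split_ifs <;> simp_all
      · by_cases hm : c = 'm'
        · subst hm
          simp [wordsA, findMatch, PySem.Chars.startswith, List.isPrefixOf_iff_prefix]
          split_ifs <;> simp_all
        · simp [wordsA, findMatch, PySem.Chars.startswith, ha, hy, hw, hm,
            Ne.symm ha, Ne.symm hy, Ne.symm hw, Ne.symm hm]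

-- loop invariant: A's scan from position i behaves like B's loop on the suffix b[i:]
theorem key (n : Nat) : ∀ (b : List Char) (i : Nat) (prev : String),
    b.length - i ≤ n → whileA b i prev = okB (b.drop i) prev := by
  induction n with
  | zero =>
    intro b i prev hn
    have hi : ¬ i < b.length := by omega
    have hd : b.drop i = [] := List.drop_eq_nil_of_le (by omega)
    rw [whileA, if_neg hi, hd, okB]
  | succ n ih =>
    intro b i prev hn
    by_cases hi : i < b.length
    · obtain ⟨c, rest, hcr⟩ : ∃ c rest, b.drop i = c :: rest := by
        cases hd : b.drop i with
        | nil => exfalso; have := List.length_drop (l := b) (i := i); simp [hd] at this; omega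
        | cons c rest => exact ⟨c, rest, rfl⟩
      have hstep := step_eq c rest prev
      rw [whileA, if_pos hi, hcr, okB]
      split <;> split
      · rename_i w' hfm hg
        simp only [hg] at hstep
        rw [hfm] at hstep
        simp at hstep
      · rename_i w' hfm w hg
        simp only [hg] at hstep
        rw [hfm] at hstep
        by_cases hcond : w = prev ∨ ¬ (w.toList <+: (c :: rest))
        · rw [if_pos hcond] at hstep
          simp at hstep
        · rw [if_neg hcond] at hstep
          injection hstep with hww
          subst hww
          obtain ⟨h1, h2⟩ := not_or.mp hcond
          rw [not_not] at h2
          have hbool : (w' == prev || !PySem.Chars.startswith (c :: rest) w'.toList) = false := by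
            simp [PySem.Chars.startswith, List.isPrefixOf_iff_prefix, h1, h2]
          rw [hbool]
          simp only [Bool.false_eq_true, if_false]
          have hlen : w'.toList.length ≤ (c :: rest).length := h2.length_le
          have hlenb : (c :: rest).length = b.length - i := by rw [← hcr, List.length_drop]
          have hpos : 0 < w'.toList.length := TOK_len_pos hg
          rw [ih b (i + w'.toList.length) w' (by omega)]
          rw [← hcr, List.drop_drop]
      · rfl
      · rename_i hfm w hg
        simp only [hg] at hstep
        rw [hfm] at hstep
        by_cases hcond : w = prev ∨ ¬ (w.toList <+: (c :: rest))
        · have hbool : (w == prev || !PySem.Chars.startswith (c :: rest) w.toList) = true := by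
            simp only [Bool.or_eq_true, beq_iff_eq, Bool.not_eq_true',
              PySem.Chars.startswith, Bool.eq_false_iff, ne_eq, List.isPrefixOf_iff_prefix]
            tauto
          simp [hbool]
        · rw [if_neg hcond] at hstep
          simp at hstep
    · have hd : b.drop i = [] := List.drop_eq_nil_of_le (by omega)
      rw [whileA, if_neg hi, hd, okB]

theorem fold_eq (xs : List String) : ∀ (a : Int),
    xs.foldl (fun answer b => if whileA b.toList 0 "" then answer + 1 else answer) a
      = xs.foldl (fun acc b => acc + (if okB b.toList "" then 1 else 0)) a := by
  induction xs with
  | nil => intro a; rfl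
  | cons x xs ih =>
    intro a
    have hx : whileA x.toList 0 "" = okB x.toList "" := by
      simpa using key x.toList.length x.toList 0 "" (by omega)
    simp only [List.foldl_cons]
    rw [hx]
    by_cases h : okB x.toList "" <;> simp [h, ih]

-- ===== VERDICT (by name: the statement is the Claim_ definition above) =====
theorem solution_spec : Claim_equal_solution := by
  intro babbling _
  unfold Spec_solution solution solution_alt
  exact fold_eq babbling 0
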